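-- pv_equiv track=rewrite | github.com/tub-msc/ordec | ordec/schematic/routing.py | _window_from_points
-- ===== SOURCE A (Python) =====
-- def _window_from_points(points, width, height, margin):
--     """Create a clamped search window around points.
--
--     Args:
--         points (list): List of (x, y) points to enclose.
--         width (int): Grid width.
--         height (int): Grid height.
--         margin (int): Margin to add around the bounding box.
--
--     Returns:
--         tuple: (min_x, max_x, min_y, max_y) clamped to grid bounds.
--     """
--     min_x = min(p[0] for p in points) - margin
--     max_x = max(p[0] for p in points) + margin
--     min_y = min(p[1] for p in points) - margin
--     max_y = max(p[1] for p in points) + margin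
--     return (
--         max(0, min_x),
--         min(width - 1, max_x),
--         max(0, min_y),
--         min(height - 1, max_y),
--     )
-- ===== SOURCE B (Python) =====
-- def _window_from_points(points, width, height, margin):
--     """Single-pass variant: one loop maintains all four extrema at once."""
--     it = iter(points)
--     try:
--         x, y = next(it)
--     except StopIteration:
--         raise ValueError("min() arg is an empty sequence")
--     min_x = max_x = x
--     min_y = max_y = y
--     for x, y in it:
--         if x < min_x:
--             min_x = x
--         if x > max_x:
--             max_x = x
--         if y < min_y:
--             min_y = y
--         if y > max_y:
--             max_y = y
--     return (
--         max(0, min_x - margin),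
--         min(width - 1, max_x + margin),
--         max(0, min_y - margin),
--         min(height - 1, max_y + margin),
--     )
-- ===== Notes on version B (the rewrite author's own statement) =====
-- stated objective: alternative
-- what changed: Four separate min/max scans over the points are replaced by a single loop that seeds all four extrema from the first point and updates them together in one pass.
-- outside the precondition, e.g. on _window_from_points([], 10, 10, 1): A raises ValueError, B raises ValueError
import Mathlib
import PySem

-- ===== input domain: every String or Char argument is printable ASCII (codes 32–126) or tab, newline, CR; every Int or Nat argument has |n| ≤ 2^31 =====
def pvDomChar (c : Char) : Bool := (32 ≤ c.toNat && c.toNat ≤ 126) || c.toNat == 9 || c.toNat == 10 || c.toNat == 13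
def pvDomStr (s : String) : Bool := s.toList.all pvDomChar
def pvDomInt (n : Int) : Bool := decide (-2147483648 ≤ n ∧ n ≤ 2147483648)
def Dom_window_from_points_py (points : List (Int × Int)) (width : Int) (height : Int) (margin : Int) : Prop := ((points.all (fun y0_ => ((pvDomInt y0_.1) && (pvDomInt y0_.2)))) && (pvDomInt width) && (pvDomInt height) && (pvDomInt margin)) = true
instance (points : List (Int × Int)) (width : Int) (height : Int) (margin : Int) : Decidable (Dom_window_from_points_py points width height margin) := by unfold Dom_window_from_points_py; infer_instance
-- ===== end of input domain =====

-- B replaces A's four separate min/max scans by one loop maintaining all four extrema (alternative decomposition, same cost class).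
-- Both A and B raise ValueError on empty points; Pre_ excludes exactly that.

-- ===== PORT A =====
-- min(...)/max(...) over a generator are PySem.List.min?/max? of the mapped list; the .getD 0
-- default is never used under Pre_ (points ≠ []), where min?/max? are some _.
def window_from_points_py (points : List (Int × Int)) (width : Int) (height : Int) (margin : Int) : Int × Int × Int × Int :=
  let min_x := (PySem.List.min? (points.map Prod.fst) (fun y => y)).getD 0 - margin
  let max_x := (PySem.List.max? (points.map Prod.fst) (fun y => y)).getD 0 + margin
  let min_y := (PySem.List.min? (points.map Prod.snd) (fun y => y)).getD 0 - margin
  let max_y := (PySem.List.max? (points.map Prod.snd) (fun y => y)).getD 0 + margin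
  (max 0 min_x, min (width - 1) max_x, max 0 min_y, min (height - 1) max_y)

-- ===== PORT B =====
-- one step of B's loop: update the four extrema with one point
def pvStepB (a : Int × Int × Int × Int) (p : Int × Int) : Int × Int × Int × Int :=
  let a := if p.1 < a.1 then (p.1, a.2.1, a.2.2.1, a.2.2.2) else a
  let a := if p.1 > a.2.1 then (a.1, p.1, a.2.2.1, a.2.2.2) else a
  let a := if p.2 < a.2.2.1 then (a.1, a.2.1, p.2, a.2.2.2) else a
  if p.2 > a.2.2.2 then (a.1, a.2.1, a.2.2.1, p.2) else a

def window_from_points_py_alt (points : List (Int × Int)) (width : Int) (height : Int) (margin : Int) : Int × Int × Int × Int :=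
  match points with
  | [] => (0, 0, 0, 0)  -- B raises ValueError here (outside Pre_); value unreachable under the claim
  | (x, y) :: rest =>
    let s := rest.foldl pvStepB (x, x, y, y)
    (max 0 (s.1 - margin), min (width - 1) (s.2.1 + margin),
     max 0 (s.2.2.1 - margin), min (height - 1) (s.2.2.2 + margin))

-- ===== PRECONDITION & SPEC =====
-- Pre_ excludes the empty points list, on which both A and B raise ValueError (min() of an empty sequence).
def Pre_window_from_points_py (points : List (Int × Int)) (width : Int) (height : Int) (margin : Int) : Prop := points ≠ []
instance (points : List (Int × Int)) (width : Int) (height : Int) (margin : Int) : Decidable (Pre_window_from_points_py points width height margin) := by unfold Pre_window_from_points_py; infer_instance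
def pvWitness_window_from_points_py : (List (Int × Int)) × Int × Int × Int := ([(2, 3), (5, 1)], 10, 10, 1)
def Spec_window_from_points_py (points : List (Int × Int)) (width : Int) (height : Int) (margin : Int) (out : Int × Int × Int × Int) : Prop := out = window_from_points_py_alt points width height margin
instance (points : List (Int × Int)) (width : Int) (height : Int) (margin : Int) (out : Int × Int × Int × Int) : Decidable (Spec_window_from_points_py points width height margin out) := by unfold Spec_window_from_points_py; infer_instance

-- ===== CLAIM (what is proved, stated in full; the proofs are below) =====
def Claim_equal_window_from_points_py : Prop := ∀ (points : List (Int × Int)) (width : Int) (height : Int) (margin : Int), Dom_window_from_points_py points width height margin → Pre_window_from_points_py points width height margin → Spec_window_from_points_py points width height margin (window_from_points_py points width height margin)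

-- ===== LEMMAS AND PROOFS =====

lemma pvStepB_eq (a : Int × Int × Int × Int) (p : Int × Int) :
    pvStepB a p = (min a.1 p.1, max a.2.1 p.1, min a.2.2.1 p.2, max a.2.2.2 p.2) := by
  obtain ⟨a1, a2, a3, a4⟩ := a
  simp only [pvStepB]
  split_ifs <;> simp_all <;> omega

lemma pvFold4 (rest : List (Int × Int)) (a b c d : Int) :
    rest.foldl pvStepB (a, b, c, d) =
      (rest.foldl (fun m p => min m p.1) a, rest.foldl (fun m p => max m p.1) b,
       rest.foldl (fun m p => min m p.2) c, rest.foldl (fun m p => max m p.2) d) := by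
  induction rest generalizing a b c d with
  | nil => rfl
  | cons p t ih => simp [List.foldl_cons, pvStepB_eq, ih]

-- ===== VERDICT (by name: the statement is the Claim_ definition above) =====
theorem window_from_points_py_spec : Claim_equal_window_from_points_py := by
  intro points width height margin _ hpre
  unfold Spec_window_from_points_py window_from_points_py window_from_points_py_alt
  match points with
  | [] => exact absurd rfl hpre
  | (x, y) :: rest =>
    simp only [List.map_cons, PySem.List.min?_id_cons, PySem.List.max?_id_cons, Option.getD_some,
      pvFold4, List.foldl_map]
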